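-- pv_equiv track=rewrite | github.com/KingHyoman/CodingTest | Programmers/budget_1.py | solution
-- ===== SOURCE A (Python) =====
-- from itertools import combinations
--
-- def solution(d, budget):
--     if sum(d) < budget:
--         return len(d)
--     for i in range(len(d), 1, -1):
--         for j in combinations(d, i):
--             if sum(j) == budget:
--                 return i
--     if budget in d:
--         return 1
--     return 0
-- ===== SOURCE B (Python) =====
-- def best(d, t):
--     # max size of a subset of d summing exactly to t; -1 if none (empty subset counts for t == 0)
--     if not d:
--         return 0 if t == 0 else -1
--     skip = best(d[1:], t)
--     take = best(d[1:], t - d[0])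
--     if take >= 0:
--         take += 1
--     return skip if skip > take else take
--
-- def solution(d, budget):
--     if sum(d) < budget:
--         return len(d)
--     m = best(d, budget)
--     return m if m > 0 else 0
-- ===== Notes on version B (the rewrite author's own statement) =====
-- stated objective: alternative
-- what changed: Replaced the size-by-size enumeration of all combinations (itertools.combinations for each size from len(d) down to 2, plus a separate membership check for size 1) with a single structural skip/take recursion that directly computes the maximum cardinality of a subset summing exactly to the budget.
import Mathlib
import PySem

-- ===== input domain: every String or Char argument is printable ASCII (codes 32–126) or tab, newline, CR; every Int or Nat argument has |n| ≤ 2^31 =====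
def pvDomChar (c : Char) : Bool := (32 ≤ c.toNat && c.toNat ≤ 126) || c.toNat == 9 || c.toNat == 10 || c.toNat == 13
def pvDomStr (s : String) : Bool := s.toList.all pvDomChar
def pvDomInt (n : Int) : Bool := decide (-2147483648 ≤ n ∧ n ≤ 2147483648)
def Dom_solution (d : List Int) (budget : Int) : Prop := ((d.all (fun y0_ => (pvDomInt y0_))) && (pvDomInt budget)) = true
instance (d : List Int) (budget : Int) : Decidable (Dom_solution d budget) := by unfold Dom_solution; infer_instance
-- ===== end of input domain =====

-- B replaces A's per-size enumeration of itertools.combinations with a single skip/take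
-- structural recursion computing the maximum cardinality of a subset summing to the budget
-- (objective: alternative algorithm; no speed claim).

-- ===== PORT A =====
-- itertools.combinations(d, k) as a list of lists, in itertools order
-- (combinations containing the first element come first).
def combos : List Int → Nat → List (List Int)
  | _, 0 => [[]]
  | [], _ + 1 => []
  | x :: xs, k + 1 => (combos xs k).map (fun c => x :: c) ++ combos xs (k + 1)

-- literal port of A: guard `sum(d) < budget`, then the double loop
-- `for i in range(len(d), 1, -1): for j in combinations(d, i): if sum(j) == budget: return i`
-- (inner loop = `.any`, outer early return = `.find?`), then `if budget in d`.
-- `i.toNat` is exact: every i produced by range(len(d), 1, -1) satisfies 2 ≤ i.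
def solution (d : List Int) (budget : Int) : Int :=
  if d.sum < budget then (d.length : Int)
  else
    match (PySem.List.pyRange (d.length : Int) 1 (-1)).find?
        (fun i => (combos d i.toNat).any (fun j => j.sum == budget)) with
    | some i => i
    | none => if budget ∈ d then 1 else 0

-- ===== PORT B =====
-- best d t = max size of a subset of d summing exactly to t; -1 if none
def best : List Int → Int → Int
  | [], t => if t == 0 then 0 else -1
  | x :: xs, t =>
    let skip := best xs t
    let take0 := best xs (t - x)
    let take := if take0 ≥ 0 then take0 + 1 else take0
    if skip > take then skip else take

def solution_alt (d : List Int) (budget : Int) : Int :=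
  if d.sum < budget then (d.length : Int)
  else
    let m := best d budget
    if m > 0 then m else 0

-- ===== PRECONDITION & SPEC =====
def Spec_solution (d : List Int) (budget : Int) (out : Int) : Prop := out = solution_alt d budget
instance (d : List Int) (budget : Int) (out : Int) : Decidable (Spec_solution d budget out) := by unfold Spec_solution; infer_instance

-- ===== CLAIM (what is proved, stated in full; the proofs are below) =====
def Claim_equal_solution : Prop := ∀ (d : List Int) (budget : Int), Dom_solution d budget → Spec_solution d budget (solution d budget)

-- ===== LEMMAS AND PROOFS =====

-- max of a list of Ints with base -1
def maxI (l : List Int) : Int := l.foldr max (-1)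

-- the sizes (as Ints) of all sublists of d summing to t
def sizes (d : List Int) (t : Int) : List Int :=
  (d.sublists'.filter (fun s => s.sum == t)).map (fun s => (s.length : Int))

theorem maxI_cons (y : Int) (l : List Int) : maxI (y :: l) = max y (maxI l) := rfl

theorem neg_one_le_maxI (l : List Int) : -1 ≤ maxI l := by
  induction l with
  | nil => simp [maxI]
  | cons y l ih => rw [maxI_cons]; omega

theorem mem_le_maxI {l : List Int} {x : Int} (h : x ∈ l) : x ≤ maxI l := by
  induction l with
  | nil => simp at h
  | cons y l ih =>
    rw [maxI_cons]
    rcases List.mem_cons.mp h with h | h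
    · omega
    · have := ih h; omega

theorem maxI_mem (l : List Int) : maxI l = -1 ∨ maxI l ∈ l := by
  induction l with
  | nil => left; simp [maxI]
  | cons y l ih =>
    rw [maxI_cons]
    rcases le_total y (maxI l) with h | h
    · rw [max_eq_right h]
      rcases ih with h' | h'
      · left; exact h'
      · right; exact List.mem_cons_of_mem _ h'
    · right; rw [max_eq_left h]; exact List.mem_cons_self

theorem mem_sizes {d : List Int} {t k : Int} :
    k ∈ sizes d t ↔ ∃ s : List Int, s.Sublist d ∧ (s.length : Int) = k ∧ s.sum = t := by
  simp only [sizes, List.mem_map, List.mem_filter, List.mem_sublists', beq_iff_eq]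
  constructor
  · rintro ⟨s, ⟨hs, hsum⟩, hk⟩; exact ⟨s, hs, hk, hsum⟩
  · rintro ⟨s, hs, hk, hsum⟩; exact ⟨s, ⟨hs, hsum⟩, hk⟩

theorem sizes_nonneg {d : List Int} {t k : Int} (h : k ∈ sizes d t) : 0 ≤ k := by
  rcases mem_sizes.mp h with ⟨s, _, hk, _⟩; omega

theorem maxI_sizes_cases (d : List Int) (t : Int) :
    maxI (sizes d t) = -1 ∨ 0 ≤ maxI (sizes d t) := by
  rcases maxI_mem (sizes d t) with h | h
  · left; exact h
  · right; exact sizes_nonneg h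

theorem maxI_append (a b : List Int) : maxI (a ++ b) = max (maxI a) (maxI b) := by
  induction a with
  | nil =>
    simp only [List.nil_append]
    have := neg_one_le_maxI b
    have h0 : maxI ([] : List Int) = -1 := rfl
    rw [h0]; omega
  | cons y a ih =>
    rw [List.cons_append, maxI_cons, maxI_cons, ih]
    omega

theorem maxI_map_add_one {l : List Int} (h : ∀ x ∈ l, 0 ≤ x) :
    maxI (l.map (fun x => x + 1)) = if 0 ≤ maxI l then maxI l + 1 else -1 := by
  induction l with
  | nil => simp [maxI]
  | cons y l ih =>
    have hy : 0 ≤ y := h y List.mem_cons_self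
    have hl : ∀ x ∈ l, 0 ≤ x := fun x hx => h x (List.mem_cons_of_mem _ hx)
    have hnn : maxI l = -1 ∨ 0 ≤ maxI l := by
      rcases maxI_mem l with h' | h'
      · left; exact h'
      · right; exact hl _ h'
    rw [List.map_cons, maxI_cons, maxI_cons, ih hl]
    rcases hnn with h' | h' <;> split_ifs <;> omega

theorem sizes_nil (t : Int) : sizes [] t = if t == 0 then [0] else [] := by
  by_cases h : t = 0 <;> simp [sizes, h] <;> omega

theorem sizes_cons (x : Int) (xs : List Int) (t : Int) :
    sizes (x :: xs) t = sizes xs t ++ (sizes xs (t - x)).map (fun k => k + 1) := by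
  simp only [sizes, List.sublists'_cons, List.filter_append, List.map_append]
  congr 1
  rw [List.filter_map, List.map_map, List.map_map]
  have hfil : List.filter ((fun s => s.sum == t) ∘ List.cons x) xs.sublists' =
      List.filter (fun s : List Int => s.sum == t - x) xs.sublists' :=
    List.filter_congr (fun s _ => by
      rw [Bool.eq_iff_iff]
      simp only [Function.comp_apply, List.sum_cons, beq_iff_eq]
      omega)
  rw [hfil]
  apply List.map_congr_left
  intro s _
  simp only [Function.comp_apply, List.length_cons]
  push_cast
  ring

theorem best_eq_maxI_sizes (d : List Int) (t : Int) : best d t = maxI (sizes d t) := by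
  induction d generalizing t with
  | nil =>
    rw [sizes_nil]
    by_cases h : t = 0 <;> simp [best, maxI, h]
  | cons x xs ih =>
    rw [sizes_cons, maxI_append, maxI_map_add_one (fun k hk => sizes_nonneg hk)]
    simp only [best]
    rw [ih t, ih (t - x)]
    rcases maxI_sizes_cases xs (t - x) with h | h <;>
      rcases maxI_sizes_cases xs t with h2 | h2 <;>
      split_ifs <;> omega

theorem combos_mem {d c : List Int} {k : Nat} :
    c ∈ combos d k ↔ c.Sublist d ∧ c.length = k := by
  induction d generalizing c k with
  | nil =>
    cases k with
    | zero => simp [combos, List.length_eq_zero_iff]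
    | succ k =>
      simp only [combos, List.not_mem_nil, false_iff, not_and]
      intro hs
      have : c = [] := List.sublist_nil.mp hs
      simp [this]
  | cons x xs ih =>
    cases k with
    | zero =>
      simp only [combos, List.mem_singleton, List.length_eq_zero_iff]
      constructor
      · rintro rfl; exact ⟨List.nil_sublist _, rfl⟩
      · rintro ⟨_, h⟩; exact h
    | succ k =>
      simp only [combos, List.mem_append, List.mem_map]
      constructor
      · rintro (⟨c', hc', rfl⟩ | h)
        · rcases ih.mp hc' with ⟨hs, hl⟩
          exact ⟨List.cons_sublist_cons.mpr hs, by simp [hl]⟩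
        · rcases ih.mp h with ⟨hs, hl⟩
          exact ⟨hs.cons _, hl⟩
      · rintro ⟨hs, hl⟩
        rcases List.sublist_cons_iff.mp hs with h | ⟨r, rfl, hr⟩
        · right; exact ih.mpr ⟨h, hl⟩
        · left; exact ⟨r, ih.mpr ⟨hr, by simpa using hl⟩, rfl⟩

-- A's inner loop predicate is true exactly at members of `sizes d budget` (for 0 ≤ i)
theorem pred_true_iff (d : List Int) (budget i : Int) (hi : 0 ≤ i) :
    ((combos d i.toNat).any (fun j => j.sum == budget) = true) ↔ i ∈ sizes d budget := by
  simp only [List.any_eq_true, beq_iff_eq, mem_sizes]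
  constructor
  · rintro ⟨s, hs, hsum⟩
    rcases combos_mem.mp hs with ⟨hsub, hlen⟩
    exact ⟨s, hsub, by omega, hsum⟩
  · rintro ⟨s, hsub, hlen, hsum⟩
    exact ⟨s, combos_mem.mpr ⟨hsub, by omega⟩, hsum⟩

theorem find?_pyRange_none (p : Int → Bool) (n : Nat) :
    ((PySem.List.pyRange (n : Int) 1 (-1)).find? p = none) ↔
      ∀ j : Int, 2 ≤ j → j ≤ (n : Int) → p j = false := by
  induction n with
  | zero =>
    rw [PySem.List.pyRange_neg_one_eq_nil (by norm_num)]
    simp only [List.find?_nil, true_iff]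
    intro j h1 h2; omega
  | succ n ih =>
    by_cases hn : n = 0
    · subst hn
      rw [PySem.List.pyRange_neg_one_eq_nil (by norm_num)]
      simp only [List.find?_nil, true_iff]
      intro j h1 h2; omega
    · have h1 : (1 : Int) < ((n + 1 : Nat) : Int) := by push_cast; omega
      rw [PySem.List.pyRange_neg_one_cons h1]
      have hcast : ((n + 1 : Nat) : Int) - 1 = (n : Int) := by push_cast; omega
      rw [hcast]
      cases hp : p ((n + 1 : Nat) : Int) with
      | true =>
        rw [List.find?_cons_of_pos hp]
        simp only [reduceCtorEq, false_iff]
        intro hall2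
        have := hall2 ((n + 1 : Nat) : Int) (by push_cast; omega) (le_refl _)
        rw [hp] at this
        simp at this
      | false =>
        have hp' : p ((n : Int) + 1) = false := by simpa using hp
        rw [List.find?_cons_of_neg (by simp [hp'])]
        rw [ih]
        constructor
        · intro h j hj1 hj2
          by_cases hje : j = ((n + 1 : Nat) : Int)
          · exact hje ▸ hp
          · exact h j hj1 (by push_cast at hj2 ⊢; omega)
        · intro h j hj1 hj2
          exact h j hj1 (by push_cast at hj2 ⊢; omega)

theorem find?_pyRange_some (p : Int → Bool) (n : Nat) (i : Int)
    (h : (PySem.List.pyRange (n : Int) 1 (-1)).find? p = some i) :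
    2 ≤ i ∧ i ≤ (n : Int) ∧ p i = true ∧ ∀ j : Int, i < j → j ≤ (n : Int) → p j = false := by
  induction n with
  | zero =>
    rw [PySem.List.pyRange_neg_one_eq_nil (by norm_num)] at h
    simp at h
  | succ n ih =>
    by_cases hn : n = 0
    · subst hn
      rw [PySem.List.pyRange_neg_one_eq_nil (by norm_num)] at h
      simp at h
    · have h1 : (1 : Int) < ((n + 1 : Nat) : Int) := by push_cast; omega
      rw [PySem.List.pyRange_neg_one_cons h1] at h
      have hcast : ((n + 1 : Nat) : Int) - 1 = (n : Int) := by push_cast; omega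
      rw [hcast] at h
      cases hp : p ((n + 1 : Nat) : Int) with
      | true =>
        rw [List.find?_cons_of_pos hp] at h
        have hi : i = ((n + 1 : Nat) : Int) := by injection h with h'; omega
        subst hi
        refine ⟨by push_cast; omega, le_refl _, hp, ?_⟩
        intro j hj1 hj2; omega
      | false =>
        have hp' : p ((n : Int) + 1) = false := by simpa using hp
        rw [List.find?_cons_of_neg (by simp [hp'])] at h
        rcases ih h with ⟨ha, hb, hc, hd⟩
        refine ⟨ha, by push_cast at hb ⊢; omega, hc, ?_⟩
        intro j hj1 hj2
        by_cases hje : j = ((n + 1 : Nat) : Int)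
        · exact hje ▸ hp
        · exact hd j hj1 (by push_cast at hb hj2 ⊢; omega)

theorem sublist_length_le_int {s d : List Int} (h : s.Sublist d) :
    (s.length : Int) ≤ (d.length : Int) := by
  exact_mod_cast h.length_le

-- ===== VERDICT (by name: the statement is the Claim_ definition above) =====
theorem solution_spec : Claim_equal_solution := by
  intro d budget _
  unfold Spec_solution solution solution_alt
  by_cases hsum : d.sum < budget
  · simp [hsum]
  · simp only [hsum, if_false]
    set p : Int → Bool := fun i => (combos d i.toNat).any (fun j => j.sum == budget) with hp
    have hbm := best_eq_maxI_sizes d budget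
    set mx := maxI (sizes d budget) with hmx
    cases hfind : (PySem.List.pyRange (d.length : Int) 1 (-1)).find? p with
    | some i =>
      rcases find?_pyRange_some p d.length i hfind with ⟨hi2, hin, hpi, htail⟩
      have himem : i ∈ sizes d budget := (pred_true_iff d budget i (by omega)).mp hpi
      have hile : i ≤ mx := mem_le_maxI himem
      have hmle : mx ≤ i := by
        by_contra hlt
        push_neg at hlt
        rcases maxI_mem (sizes d budget) with hm1 | hmmem
        · rw [← hmx] at hm1; omega
        · rw [← hmx] at hmmem
          rcases mem_sizes.mp hmmem with ⟨s, hsub, hlen, _⟩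
          have hmlen : mx ≤ (d.length : Int) := by
            have := sublist_length_le_int hsub; omega
          have hpm : p mx = true := (pred_true_iff d budget mx (by omega)).mpr hmmem
          have hfa := htail mx hlt hmlen
          rw [hfa] at hpm
          simp at hpm
      have hmi : mx = i := le_antisymm hmle hile
      show i = if best d budget > 0 then best d budget else 0
      split_ifs <;> omega
    | none =>
      have hall := (find?_pyRange_none p d.length).mp hfind
      have hmle1 : mx ≤ 1 := by
        by_contra hlt
        push_neg at hlt
        rcases maxI_mem (sizes d budget) with hm1 | hmmem
        · rw [← hmx] at hm1; omega
        · rw [← hmx] at hmmem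
          rcases mem_sizes.mp hmmem with ⟨s, hsub, hlen, _⟩
          have hmlen : mx ≤ (d.length : Int) := by
            have := sublist_length_le_int hsub; omega
          have hpm : p mx = true := (pred_true_iff d budget mx (by omega)).mpr hmmem
          have hfa := hall mx (by omega) hmlen
          rw [hfa] at hpm
          simp at hpm
      show (if budget ∈ d then (1 : Int) else 0) = if best d budget > 0 then best d budget else 0
      by_cases hmem : budget ∈ d
      · have h1mem : (1 : Int) ∈ sizes d budget :=
          mem_sizes.mpr ⟨[budget], List.singleton_sublist.mpr hmem, by simp, by simp⟩
        have h1le : (1 : Int) ≤ mx := mem_le_maxI h1mem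
        rw [if_pos hmem]
        split_ifs <;> omega
      · have hmle0 : mx ≤ 0 := by
          by_contra hlt
          push_neg at hlt
          have hm1 : mx = 1 := by omega
          rcases maxI_mem (sizes d budget) with hmm | hmmem
          · rw [← hmx] at hmm; omega
          · rw [← hmx] at hmmem
            rcases mem_sizes.mp hmmem with ⟨s, hsub, hlen, hsum1⟩
            rw [hm1] at hlen
            have hlen1 : s.length = 1 := by omega
            rcases List.length_eq_one_iff.mp hlen1 with ⟨y, rfl⟩
            simp only [List.sum_cons, List.sum_nil, add_zero] at hsum1
            subst hsum1
            exact hmem (List.singleton_sublist.mp hsub)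
        rw [if_neg hmem]
        split_ifs <;> omega
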